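-- pv_equiv track=rewrite | github.com/GalRNadler/sp_final | analysis.py | convert_centroids_to_labels
-- ===== SOURCE A (Python) =====
-- def convert_centroids_to_labels(datapoints, k_means_centroids):
--     labels = []
--     centroid_map = {centroid: i for i, centroid in enumerate(k_means_centroids)}
--     for point in datapoints:
--         for centroid, points in k_means_centroids.items():
--             if point in points:
--                 labels.append(centroid_map[centroid])
--                 break
--     return labels
-- ===== SOURCE B (Python) =====
-- def convert_centroids_to_labels(datapoints, k_means_centroids):
--     index = {}
--     for i, points in enumerate(k_means_centroids.values()):
--         for point in points:
--             index.setdefault(point, i)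
--     return [index[point] for point in datapoints if point in index]
-- ===== Notes on version B (the rewrite author's own statement) =====
-- stated objective: faster
-- what changed: B builds an inverted point-to-centroid-index dictionary in one pass over the centroids (setdefault keeps the first centroid containing a point), then labels all datapoints with single dictionary lookups, replacing A's per-datapoint rescan of every centroid's point list.
import Mathlib
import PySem

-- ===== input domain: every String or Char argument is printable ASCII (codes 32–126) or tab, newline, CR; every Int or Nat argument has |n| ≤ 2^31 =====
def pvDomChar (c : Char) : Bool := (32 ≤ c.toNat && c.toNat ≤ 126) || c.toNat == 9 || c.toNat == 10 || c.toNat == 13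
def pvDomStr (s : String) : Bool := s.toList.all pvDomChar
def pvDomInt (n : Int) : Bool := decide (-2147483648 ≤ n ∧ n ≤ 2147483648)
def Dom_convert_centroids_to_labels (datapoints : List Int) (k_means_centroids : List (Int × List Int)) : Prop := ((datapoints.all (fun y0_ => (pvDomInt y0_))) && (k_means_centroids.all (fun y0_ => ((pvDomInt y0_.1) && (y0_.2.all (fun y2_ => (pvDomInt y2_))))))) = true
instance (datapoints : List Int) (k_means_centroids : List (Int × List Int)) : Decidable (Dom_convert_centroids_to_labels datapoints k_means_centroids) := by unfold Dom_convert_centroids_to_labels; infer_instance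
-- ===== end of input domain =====

-- B replaces A's per-datapoint rescan of every centroid's point list by an inverted
-- point→centroid-index dictionary built once, then one lookup per datapoint (objective: faster).

-- ===== PORT A =====
-- inner 'for centroid, points in k_means_centroids.items(): if point in points: … break'
-- (centroid_map[centroid] is always present, since centroid is a key of the same dict; getD's default is unreachable)
def pyInnerA (cm : PySem.Dict Int Int) (point : Int) : List (Int × List Int) → Option Int
  | [] => none
  | (centroid, points) :: rest =>
    if point ∈ points then some (cm.getD centroid 0)
    else pyInnerA cm point rest

def convert_centroids_to_labels (datapoints : List Int) (k_means_centroids : List (Int × List Int)) : List Int :=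
  let centroid_map : PySem.Dict Int Int :=
    (PySem.List.enumerate (k_means_centroids.map Prod.fst) 0).foldl
      (fun d e => d.insert e.2 e.1) PySem.Dict.empty
  datapoints.foldl (fun labels point =>
    match pyInnerA centroid_map point k_means_centroids with
    | some l => labels ++ [l]
    | none => labels) []

-- ===== PORT B =====
def convert_centroids_to_labels_alt (datapoints : List Int) (k_means_centroids : List (Int × List Int)) : List Int :=
  let index : PySem.Dict Int Int :=
    (PySem.List.enumerate (k_means_centroids.map Prod.snd) 0).foldl
      (fun d e => e.2.foldl (fun d q => d.setdefault q e.1) d) PySem.Dict.empty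
  datapoints.filterMap (fun point => index.get? point)

-- ===== PRECONDITION & SPEC =====
-- Pre_ requires pairwise-distinct centroid keys: the invariant every Python dict satisfies by
-- construction, so no actual Python input is excluded (an association list with duplicate keys
-- corresponds to no Python dict value).
def Pre_convert_centroids_to_labels (datapoints : List Int) (k_means_centroids : List (Int × List Int)) : Prop :=
  (k_means_centroids.map Prod.fst).Nodup
instance (datapoints : List Int) (k_means_centroids : List (Int × List Int)) : Decidable (Pre_convert_centroids_to_labels datapoints k_means_centroids) := by unfold Pre_convert_centroids_to_labels; infer_instance

def pvWitness_convert_centroids_to_labels : List Int × (List (Int × List Int)) :=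
  ([1, 5, 2], [(0, [1, 2]), (7, [5, 6])])

def Spec_convert_centroids_to_labels (datapoints : List Int) (k_means_centroids : List (Int × List Int)) (out : List Int) : Prop := out = convert_centroids_to_labels_alt datapoints k_means_centroids
instance (datapoints : List Int) (k_means_centroids : List (Int × List Int)) (out : List Int) : Decidable (Spec_convert_centroids_to_labels datapoints k_means_centroids out) := by unfold Spec_convert_centroids_to_labels; infer_instance

-- ===== CLAIM (what is proved, stated in full; the proofs are below) =====
def Claim_equal_convert_centroids_to_labels : Prop := ∀ (datapoints : List Int) (k_means_centroids : List (Int × List Int)), Dom_convert_centroids_to_labels datapoints k_means_centroids → Pre_convert_centroids_to_labels datapoints k_means_centroids → Spec_convert_centroids_to_labels datapoints k_means_centroids (convert_centroids_to_labels datapoints k_means_centroids)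

-- ===== LEMMAS AND PROOFS =====

-- A's outer loop (append when the inner scan finds a label) is a filterMap.
theorem pv_foldl_opt_append (f : Int → Option Int) :
    ∀ (dp : List Int) (acc : List Int),
      dp.foldl (fun labels point => match f point with
        | some l => labels ++ [l]
        | none => labels) acc = acc ++ dp.filterMap f := by
  intro dp
  induction dp with
  | nil => intro acc; simp
  | cons p rest ih =>
    intro acc
    simp only [List.foldl_cons, List.filterMap_cons]
    cases h : f p with
    | none => simp [ih]
    | some l => simp [ih]

-- A's inner scan, with the centroid_map lookups given as offset indices.
theorem pv_innerA_eq_findIdx (cm : PySem.Dict Int Int) (p : Int) :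
    ∀ (l : List (Int × List Int)) (s : Int),
      (∀ j (hj : j < l.length), cm.getD (l[j].1) 0 = s + (j : Int)) →
      pyInnerA cm p l
        = (l.findIdx? (fun e => decide (p ∈ e.2))).map (fun j => s + (j : Int)) := by
  intro l
  induction l with
  | nil => intro s _; simp [pyInnerA]
  | cons e rest ih =>
    intro s hg
    obtain ⟨c, pts⟩ := e
    by_cases hp : p ∈ pts
    · have h0 : cm.getD c 0 = s := by simpa using hg 0 (by simp)
      simp [pyInnerA, hp, List.findIdx?_cons, h0]
    · have hrest : ∀ j (hj : j < rest.length), cm.getD (rest[j].1) 0 = (s + 1) + (j : Int) := by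
        intro j hj
        have := hg (j + 1) (by simpa using Nat.succ_lt_succ hj)
        simp only [List.getElem_cons_succ] at this
        rw [this]
        push_cast
        ring
      simp only [pyInnerA, hp, if_false, ih (s + 1) hrest, List.findIdx?_cons,
        decide_eq_true_eq]
      cases hf : rest.findIdx? (fun e => decide (p ∈ e.2)) <;> simp [hf]
      push_cast
      ring

-- one centroid's 'for point in points: index.setdefault(point, i)'
theorem pv_setdefault_fold_get? (i p : Int) :
    ∀ (pts : List Int) (d : PySem.Dict Int Int),
      (pts.foldl (fun d q => d.setdefault q i) d).get? p
        = (match d.get? p with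
           | some v => some v
           | none => if p ∈ pts then some i else none) := by
  intro pts
  induction pts with
  | nil => intro d; cases h : d.get? p <;> simp [h]
  | cons q rest ih =>
    intro d
    simp only [List.foldl_cons, ih]
    by_cases hq : p = q
    · subst hq
      rw [PySem.Dict.get?_setdefault_self]
      cases h : d.get? p <;> simp [h]
    · rw [PySem.Dict.get?_setdefault_of_ne d i hq]
      cases h : d.get? p <;> simp [hq]

-- B's whole index-building loop: get? p is the first centroid index whose points contain p.
theorem pv_build_get? (p : Int) :
    ∀ (l : List (List Int)) (s : Int) (d : PySem.Dict Int Int),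
      ((PySem.List.enumerate l s).foldl
          (fun d e => e.2.foldl (fun d q => d.setdefault q e.1) d) d).get? p
        = (match d.get? p with
           | some v => some v
           | none => (l.findIdx? (fun pts => decide (p ∈ pts))).map (fun j => s + (j : Int))) := by
  intro l
  induction l with
  | nil =>
    intro s d
    cases h : d.get? p <;> simp [PySem.List.enumerate_nil, h]
  | cons pts rest ih =>
    intro s d
    rw [PySem.List.enumerate_cons, List.foldl_cons, ih (s + 1), pv_setdefault_fold_get?]
    cases h : d.get? p with
    | some v => simp
    | none =>
      by_cases hp : p ∈ pts
      · simp [hp, List.findIdx?_cons]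
      · simp only [hp, if_false, List.findIdx?_cons, decide_eq_true_eq]
        cases hf : rest.findIdx? (fun pts => decide (p ∈ pts)) <;> simp
        ring

-- A's centroid_map maps each key to its enumeration index (needs Nodup keys).
theorem pv_centroid_map_getD (km : List (Int × List Int))
    (hnd : (km.map Prod.fst).Nodup) (j : Nat) (hj : j < km.length) :
    ((PySem.List.enumerate (km.map Prod.fst) 0).foldl
        (fun d e => d.insert e.2 e.1) PySem.Dict.empty).getD (km[j].1) 0 = (j : Int) := by
  set l := PySem.List.enumerate (km.map Prod.fst) 0 with hl
  have hfresh : ∀ e ∈ l, (PySem.Dict.empty : PySem.Dict Int Int).contains e.2 = false := by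
    intro e _; simp [PySem.Dict.contains_empty]
  have hkeys : (l.map Prod.snd).Nodup := by
    rw [hl, PySem.List.map_snd_enumerate]; exact hnd
  have hitems := PySem.Dict.items_foldl_insert_fresh (l := l) (k := Prod.snd) (v := Prod.fst)
    (d := PySem.Dict.empty) hfresh hkeys
  have hmem : ((km[j].1 : Int), (j : Int)) ∈
      (l.foldl (fun d e => d.insert e.2 e.1) PySem.Dict.empty).items := by
    rw [hitems]
    simp only [PySem.Dict.empty, List.nil_append, List.mem_map]
    refine ⟨((j : Int), km[j].1), ?_, rfl⟩
    rw [hl]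
    have : ((0 : Int) + (j : Int), (km.map Prod.fst)[j]'(by simpa using hj))
        ∈ PySem.List.enumerate (km.map Prod.fst) 0 := by
      rw [PySem.List.mem_enumerate_iff]
      exact ⟨j, by simpa using hj, rfl⟩
    simpa using this
  have hnodup : (l.foldl (fun d e => d.insert e.2 e.1) PySem.Dict.empty).keys.Nodup := by
    apply PySem.Dict.nodup_keys_foldl_insert_key
    simp [PySem.Dict.keys_empty]
  exact PySem.Dict.getD_of_mem_items _ hmem hnodup 0

-- ===== VERDICT (by name: the statement is the Claim_ definition above) =====
theorem convert_centroids_to_labels_spec : Claim_equal_convert_centroids_to_labels := by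
  intro dp km _ hpre
  unfold Spec_convert_centroids_to_labels convert_centroids_to_labels convert_centroids_to_labels_alt
  rw [pv_foldl_opt_append, List.nil_append]
  apply List.filterMap_congr
  intro p _
  rw [pv_build_get? p (km.map Prod.snd) 0 PySem.Dict.empty]
  rw [pv_innerA_eq_findIdx _ p km 0 (by
    intro j hj
    simpa using pv_centroid_map_getD km hpre j hj)]
  rw [PySem.Dict.get?_empty]
  rw [List.findIdx?_map]
  rfl
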